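-- pv_equiv track=rewrite | github.com/HerrineKim/TIL | Algorithm/코업-프로젝트/codes/8주차/cache.py | solution
-- ===== SOURCE A (Python) =====
-- def solution(cacheSize, cities):
--     answer = 0
--     cache = []
--     if cacheSize == 0:
--         answer = len(cities) * 5
--     else:
--         for city in cities:  # 시티 순회하면서
--             city = city.lower()  # 전부 소문자로 바꿔서 계산
--             if city not in cache:  # 캐시에 없으면서 (cache miss)
--                 if len(cache) < cacheSize:  # 캐시사이즈보다 작으면 더 들어갈 수 있으므로 넣음
--                     cache.append(city)
--                 else:  # 캐시사이즈랑 같으면 가장 오래전 참조한 값 빼고 현재값 넣어줌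
--                     cache.pop(0)
--                     cache.append(city)
--                 answer += 5
--             else:  # 캐시에 있는 경우 (cache hit)
--                 cache.pop(cache.index(city))  # 해당 값을 가장 최신 위치에 넣어줌
--                 cache.append(city)
--                 answer += 1
--
--     return answer
-- ===== SOURCE B (Python) =====
-- def solution(cacheSize, cities):
--     # Reuse-distance formulation: no cache is simulated; an access is a hit
--     # iff the city occurred before and the cities accessed since its last
--     # access span fewer than cacheSize distinct names.
--     if cacheSize == 0:
--         return len(cities) * 5
--     answer = 0
--     seen = []
--     last = {}
--     for city in cities:
--         c = city.lower()
--         j = last.get(c)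
--         if j is not None and len(set(seen[j + 1:])) < cacheSize:
--             answer += 1
--         else:
--             answer += 5
--         last[c] = len(seen)
--         seen.append(c)
--     return answer
-- ===== Notes on version B (the rewrite author's own statement) =====
-- stated objective: alternative
-- what changed: B does not simulate a cache at all: it decides each access by the LRU reuse-distance criterion (a hit iff the city occurred before and fewer than cacheSize distinct cities were accessed since its last access), using a last-occurrence dict over the accessed prefix, whereas A maintains and evicts an explicit cache list.
import Mathlib
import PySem

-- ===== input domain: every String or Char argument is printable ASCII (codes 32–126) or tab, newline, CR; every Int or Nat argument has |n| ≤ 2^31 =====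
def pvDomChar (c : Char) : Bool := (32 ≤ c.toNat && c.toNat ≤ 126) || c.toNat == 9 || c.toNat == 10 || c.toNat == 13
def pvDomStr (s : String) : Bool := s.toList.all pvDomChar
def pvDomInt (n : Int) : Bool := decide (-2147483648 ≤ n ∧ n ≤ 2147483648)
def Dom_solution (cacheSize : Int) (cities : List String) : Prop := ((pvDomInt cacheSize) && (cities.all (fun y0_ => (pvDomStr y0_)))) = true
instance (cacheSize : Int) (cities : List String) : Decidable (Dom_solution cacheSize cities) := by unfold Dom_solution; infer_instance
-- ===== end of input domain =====

-- B drops A's cache simulation entirely: each access is classified by the LRU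
-- reuse-distance criterion (hit iff seen before with < cacheSize distinct cities since);
-- an alternative algorithm of similar cost, not claimed faster.

-- ===== PORT A =====
-- one iteration of A's for-loop; Option threads Python's IndexError (pop on empty / index miss)
def solAStep (cacheSize : Int) (st : Int × List String) (city : String) :
    Option (Int × List String) :=
  let c := PySem.Str.lower city
  if st.2.contains c = false then          -- cache miss
    if (st.2.length : Int) < cacheSize then
      some (st.1 + 5, st.2 ++ [c])
    else
      (PySem.List.pop? st.2 0).map (fun r => (st.1 + 5, r.2 ++ [c]))
  else                                      -- cache hit: cache.pop(cache.index(c)); append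
    (PySem.List.index? st.2 c).bind (fun i =>
      (PySem.List.pop? st.2 (i : Int)).map (fun r => (st.1 + 1, r.2 ++ [c])))

def solution (cacheSize : Int) (cities : List String) : Int :=
  if cacheSize = 0 then (cities.length : Int) * 5
  else
    ((cities.foldl (fun acc city => acc.bind (fun st => solAStep cacheSize st city))
        (some ((0 : Int), ([] : List String)))).map Prod.fst).getD 0

-- ===== PORT B =====
-- one iteration of B's loop: state (answer, seen prefix, last-occurrence dict)
def solBStep (cacheSize : Int) (st : Int × List String × PySem.Dict String Int)
    (city : String) : Int × List String × PySem.Dict String Int :=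
  let c := PySem.Str.lower city
  let ans :=
    match st.2.2.get? c with                -- j = last.get(c)
    | some j =>
        if ((PySem.Set.ofList (PySem.List.slice st.2.1 (some (j + 1)) none)).length : Int)
            < cacheSize
        then st.1 + 1 else st.1 + 5
    | none => st.1 + 5
  (ans, st.2.1 ++ [c], st.2.2.insert c (st.2.1.length : Int))

def solution_alt (cacheSize : Int) (cities : List String) : Int :=
  if cacheSize = 0 then (cities.length : Int) * 5
  else
    (cities.foldl (solBStep cacheSize)
      ((0 : Int), ([] : List String), (PySem.Dict.empty : PySem.Dict String Int))).1

-- ===== PRECONDITION & SPEC =====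
-- A raises IndexError (pop(0) on the empty cache) when cacheSize < 0 and a city arrives;
-- those inputs are excluded (A returns on everything Pre_ admits).
def Pre_solution (cacheSize : Int) (cities : List String) : Prop :=
  0 ≤ cacheSize ∨ cities = []
instance (cacheSize : Int) (cities : List String) : Decidable (Pre_solution cacheSize cities) := by
  unfold Pre_solution; infer_instance

def pvWitness_solution : Int × List String := (2, ["Seoul", "jeju", "SEOUL", "NY"])

def Spec_solution (cacheSize : Int) (cities : List String) (out : Int) : Prop := out = solution_alt cacheSize cities
instance (cacheSize : Int) (cities : List String) (out : Int) : Decidable (Spec_solution cacheSize cities out) := by unfold Spec_solution; infer_instance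

-- ===== CLAIM (what is proved, stated in full; the proofs are below) =====
def Claim_equal_solution : Prop := ∀ (cacheSize : Int) (cities : List String), Dom_solution cacheSize cities → Pre_solution cacheSize cities → Spec_solution cacheSize cities (solution cacheSize cities)

-- ===== LEMMAS AND PROOFS =====

-- the LRU recency list of a prefix: distinct cities ordered by last access (oldest first)
def recStep (r : List String) (c : String) : List String := r.erase c ++ [c]
def recList (p : List String) : List String := p.foldl recStep []

-- A's cache after a prefix = the most recent cacheSize entries of the recency list
def cacheOf (C : Int) (l : List String) : List String := l.drop (l.length - C.toNat)

-- B's dict invariant: last.get?(c) is the index of the last occurrence of c in seen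
def LastInv (seen : List String) (d : PySem.Dict String Int) : Prop :=
  ∀ c, (d.get? c = none → c ∉ seen) ∧
       (∀ j, d.get? c = some j →
          ∃ u v, seen = u ++ c :: v ∧ (u.length : Int) = j ∧ c ∉ v)

theorem nodup_append_single (l : List String) (x : String) (h1 : l.Nodup) (h2 : x ∉ l) :
    (l ++ [x]).Nodup :=
  (List.perm_append_singleton x l).symm.nodup (List.nodup_cons.2 ⟨h2, h1⟩)

theorem recList_append (p : List String) (c : String) :
    recList (p ++ [c]) = (recList p).erase c ++ [c] := by
  simp [recList, List.foldl_append, recStep]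

theorem foldl_recStep_nodup (p : List String) : ∀ r : List String, r.Nodup →
    (p.foldl recStep r).Nodup := by
  induction p with
  | nil => intro r h; exact h
  | cons c p ih =>
    intro r h
    refine ih _ (nodup_append_single _ _ (h.erase c) ?_)
    intro hc
    exact ((h.mem_erase_iff).1 hc).1 rfl

theorem recList_nodup (p : List String) : (recList p).Nodup :=
  foldl_recStep_nodup p [] List.nodup_nil

theorem mem_foldl_recStep (p : List String) : ∀ (r : List String) (x : String),
    x ∈ p.foldl recStep r ↔ x ∈ r ∨ x ∈ p := by
  induction p with
  | nil => intro r x; simp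
  | cons c p ih =>
    intro r x
    rw [List.foldl_cons, ih]
    by_cases hx : x = c
    · subst hx; simp [recStep]
    · simp [recStep, List.mem_erase_of_ne hx, hx]

theorem mem_recList (p : List String) (x : String) : x ∈ recList p ↔ x ∈ p := by
  simpa using mem_foldl_recStep p [] x

-- processing v from a state ending in c (c not accessed in v): the part after c is recList v
theorem recList_suffix (v : List String) : ∀ (w0 : List String) (c : String),
    c ∉ v → (w0 ++ [c]).Nodup →
    ∃ w, c ∉ w ∧ v.foldl recStep (w0 ++ [c]) = w ++ c :: recList v := by
  induction v using List.reverseRecOn with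
  | nil =>
    intro w0 c _ hnd
    exact ⟨w0, fun h => List.disjoint_of_nodup_append hnd h (by simp), by simp [recList]⟩
  | append_singleton v d ih =>
    intro w0 c hc hnd
    have hcv : c ∉ v := fun h => hc (List.mem_append_left _ h)
    have hcd : c ≠ d := fun h => hc (by simp [h])
    obtain ⟨w, hw, heq⟩ := ih w0 c hcv hnd
    have hndall : (w ++ c :: recList v).Nodup := heq ▸ foldl_recStep_nodup v _ hnd
    rw [List.foldl_append, heq]
    simp only [List.foldl_cons, List.foldl_nil, recStep]
    by_cases hd : d ∈ w
    · have hdv : d ∉ recList v := fun hmem =>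
        List.disjoint_of_nodup_append hndall hd (List.mem_cons_of_mem _ hmem)
      have hdvl : d ∉ v := fun h => hdv ((mem_recList v d).2 h)
      refine ⟨w.erase d, fun h => hw (List.mem_of_mem_erase h), ?_⟩
      rw [List.erase_append_left _ hd, recList_append, List.erase_of_not_mem hdv]
      simp
    · refine ⟨w, hw, ?_⟩
      rw [List.erase_append_right _ hd, recList_append]
      have h1 : (c :: recList v).erase d = c :: (recList v).erase d := by
        simp [hcd]
      rw [h1]
      simp

theorem recList_decomp (u v : List String) (c : String) (hc : c ∉ v) :
    ∃ w, c ∉ w ∧ recList (u ++ c :: v) = w ++ c :: recList v := by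
  have h1 : recList (u ++ c :: v) = v.foldl recStep ((recList u).erase c ++ [c]) := by
    simp [recList, List.foldl_append, recStep]
  have hndu : ((recList u).erase c ++ [c]).Nodup := by
    refine nodup_append_single _ _ ((recList_nodup u).erase c) ?_
    intro hmem
    exact (((recList_nodup u).mem_erase_iff).1 hmem).1 rfl
  obtain ⟨w, hw, heq⟩ := recList_suffix v ((recList u).erase c) c hc hndu
  exact ⟨w, hw, h1 ▸ heq⟩

theorem mem_cacheOf_iff (C : Int) (hC : 1 ≤ C) (w z : List String) (c : String)
    (_hw : c ∉ w) (hz : c ∉ z) :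
    c ∈ cacheOf C (w ++ c :: z) ↔ (z.length : Int) < C := by
  have hCt : (C.toNat : Int) = C := Int.toNat_of_nonneg (by omega)
  unfold cacheOf
  rw [List.drop_append]
  set k := (w ++ c :: z).length - C.toNat with hk
  have hlen : (w ++ c :: z).length = w.length + z.length + 1 := by simp; omega
  by_cases h : k ≤ w.length
  · have : c ∈ w.drop k ++ (c :: z).drop (k - w.length) := by
      have : k - w.length = 0 := by omega
      simp [this]
    simp only [this, true_iff]
    omega
  · have h1 : w.drop k = [] := List.drop_eq_nil_of_le (by omega)
    have h2 : ∃ m, k - w.length = m + 1 := ⟨k - w.length - 1, by omega⟩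
    obtain ⟨m, hm⟩ := h2
    rw [h1, hm]
    simp only [List.nil_append, List.drop_succ_cons]
    constructor
    · intro hmem; exact absurd (List.mem_of_mem_drop hmem) hz
    · intro hlt; omega

theorem length_eq_of_nodup_iff_mem (l₁ l₂ : List String) (h₁ : l₁.Nodup) (h₂ : l₂.Nodup)
    (h : ∀ x, x ∈ l₁ ↔ x ∈ l₂) : l₁.length = l₂.length := by
  rw [← List.toFinset_card_of_nodup h₁, ← List.toFinset_card_of_nodup h₂]
  congr 1
  ext x
  simp [h x]

-- one step of A from the invariant state, for 1 ≤ C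
theorem stepA_eq (C : Int) (hC : 1 ≤ C) (ans : Int) (r : List String) (hnd : r.Nodup)
    (city : String) :
    solAStep C (ans, cacheOf C r) city =
      some ((if PySem.Str.lower city ∈ cacheOf C r then ans + 1 else ans + 5),
            cacheOf C (recStep r (PySem.Str.lower city))) := by
  have hCt : (C.toNat : Int) = C := Int.toNat_of_nonneg (by omega)
  simp only [solAStep, recStep, cacheOf]
  generalize PySem.Str.lower city = c
  by_cases hm : c ∈ List.drop (r.length - C.toNat) r
  · -- cache hit branch
    have hmemr : c ∈ r := List.mem_of_mem_drop hm
    have hlen1 : 1 ≤ r.length := List.length_pos_of_mem hmemr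
    rw [if_neg (by simp [hm])]
    obtain ⟨i, hi⟩ := Option.isSome_iff_exists.1 ((PySem.List.index?_isSome_iff _ _).2 hm)
    obtain ⟨pre, suf, hsplit, hilen, hpre⟩ := (PySem.List.index?_eq_some_iff _ _ _).1 hi
    have hndc : (List.drop (r.length - C.toNat) r).Nodup := hnd.sublist (List.drop_sublist _ _)
    have hcsuf : c ∉ suf := by
      rw [hsplit] at hndc; exact (List.nodup_cons.1 hndc.of_append_right).1
    have hilt : i < (List.drop (r.length - C.toNat) r).length := by
      rw [hsplit]; simp [← hilen]
    rw [hi, Option.bind_some, PySem.List.pop?_natCast _ _ hilt, Option.map_some]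
    have hEI : (List.drop (r.length - C.toNat) r).eraseIdx i = pre ++ suf := by
      rw [hsplit, ← hilen, List.eraseIdx_append_of_length_le (Nat.le_refl _)]; simp
    have hctake : c ∉ List.take (r.length - C.toNat) r := fun h =>
      List.disjoint_of_nodup_append (by rw [List.take_append_drop]; exact hnd) h hm
    have herase : r.erase c = List.take (r.length - C.toNat) r ++ (pre ++ suf) := by
      conv_lhs => rw [← List.take_append_drop (r.length - C.toNat) r]
      rw [List.erase_append_right _ hctake, hsplit, List.erase_append_right _ hpre,
          List.erase_cons_head]
    have hre : r.erase c ++ [c]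
        = List.take (r.length - C.toNat) r ++ ((pre ++ suf) ++ [c]) := by
      rw [herase, List.append_assoc]
    have hlene : (r.erase c).length = r.length - 1 := List.length_erase_of_mem hmemr
    have hdropamt : (r.erase c ++ [c]).length - C.toNat = r.length - C.toNat := by
      simp [hlene]; omega
    rw [hdropamt, hre, List.drop_left' (by simp [List.length_take]), if_pos hm, hEI]
  · -- cache miss branch
    rw [if_pos (by simp [hm]), if_neg hm]
    by_cases hlt : ((List.drop (r.length - C.toNat) r).length : Int) < C
    · rw [if_pos hlt]
      have hrlt : r.length < C.toNat := by
        rw [List.length_drop] at hlt; omega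
      have hk0 : r.length - C.toNat = 0 := by omega
      have hcr : c ∉ r := by rw [hk0] at hm; simpa using hm
      rw [hk0, List.drop_zero, List.erase_of_not_mem hcr]
      have h0 : (r ++ [c]).length - C.toNat = 0 := by simp; omega
      rw [h0, List.drop_zero]
    · rw [if_neg hlt]
      have hCle : C.toNat ≤ r.length := by
        rw [List.length_drop] at hlt; omega
      have hlenc : (List.drop (r.length - C.toNat) r).length = C.toNat := by
        rw [List.length_drop]; omega
      have hCpos : 1 ≤ C.toNat := by omega
      cases hcache : List.drop (r.length - C.toNat) r with
      | nil => rw [hcache] at hlenc; simp at hlenc; omega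
      | cons h t =>
        rw [PySem.List.pop?_zero_cons, Option.map_some]
        have ht : t = List.drop (r.length - C.toNat + 1) r := by
          have h2 := congrArg List.tail hcache
          simpa [List.tail_drop] using h2.symm
        by_cases hcr : c ∈ r
        · -- c was evicted earlier: it sits in the first (len - C) elements
          have hctk : c ∈ List.take (r.length - C.toNat) r := by
            have h3 := (List.take_append_drop (r.length - C.toNat) r) ▸ hcr
            rcases List.mem_append.1 h3 with h1 | h1
            · exact h1
            · exact absurd h1 hm
          have hk1 : 1 ≤ r.length - C.toNat := by
            rcases Nat.eq_zero_or_pos (r.length - C.toNat) with h0 | h0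
            · rw [h0] at hctk; simp at hctk
            · omega
          have herase : r.erase c
              = (List.take (r.length - C.toNat) r).erase c
                  ++ List.drop (r.length - C.toNat) r := by
            conv_lhs => rw [← List.take_append_drop (r.length - C.toNat) r]
            exact List.erase_append_left _ hctk
          have hlet : ((List.take (r.length - C.toNat) r).erase c).length
              = r.length - C.toNat - 1 := by
            rw [List.length_erase_of_mem hctk, List.length_take]; omega
          have hlene : (r.erase c).length = r.length - 1 :=
            List.length_erase_of_mem hcr
          have hdropamt : (r.erase c ++ [c]).length - C.toNat = r.length - C.toNat := by
            simp [hlene]; omega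
          have hnil : List.drop (r.length - C.toNat)
              ((List.take (r.length - C.toNat) r).erase c) = [] :=
            List.drop_eq_nil_of_le (by rw [hlet]; omega)
          rw [hdropamt, herase, List.append_assoc, List.drop_append, hnil, hlet,
              show r.length - C.toNat - (r.length - C.toNat - 1) = 1 by omega, hcache]
          simp
        · -- c is new: list grows by one, eviction index shifts by one
          rw [List.erase_of_not_mem hcr]
          have hdropamt : (r ++ [c]).length - C.toNat = r.length - C.toNat + 1 := by
            simp; omega
          rw [hdropamt, List.drop_append,
              show r.length - C.toNat + 1 - r.length = 0 by omega, List.drop_zero, ← ht]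

-- one step of B from the invariant state, for 1 ≤ C
theorem stepB_eq (C : Int) (hC : 1 ≤ C) (ans : Int) (seen : List String)
    (d : PySem.Dict String Int) (hinv : LastInv seen d) (city : String) :
    solBStep C (ans, seen, d) city =
      ((if PySem.Str.lower city ∈ cacheOf C (recList seen) then ans + 1 else ans + 5),
       seen ++ [PySem.Str.lower city],
       d.insert (PySem.Str.lower city) (seen.length : Int)) := by
  simp only [solBStep]
  cases hg : d.get? (PySem.Str.lower city) with
  | none =>
    have hns : PySem.Str.lower city ∉ seen := (hinv _).1 hg
    have hnc : PySem.Str.lower city ∉ cacheOf C (recList seen) := fun h =>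
      hns ((mem_recList _ _).1 (List.mem_of_mem_drop h))
    simp [hnc]
  | some j =>
    obtain ⟨u, v, hs, hl, hv⟩ := (hinv _).2 j hg
    have hslice : PySem.List.slice seen (some (j + 1)) none = v := by
      have hj1 : j + 1 = ((u.length + 1 : Nat) : Int) := by push_cast; omega
      rw [hj1, PySem.List.slice_from_natCast, hs, List.drop_append,
          List.drop_eq_nil_of_le (by omega), show u.length + 1 - u.length = 1 by omega]
      simp
    obtain ⟨w, hwc, hdec⟩ := recList_decomp u v (PySem.Str.lower city) hv
    have hcv : PySem.Str.lower city ∉ recList v := fun h => hv ((mem_recList _ _).1 h)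
    have hiff : (((PySem.Set.ofList (PySem.List.slice seen (some (j + 1)) none)).length : Int) < C)
        ↔ PySem.Str.lower city ∈ cacheOf C (recList seen) := by
      have hmm : PySem.Str.lower city ∈ cacheOf C (recList seen)
          ↔ ((recList v).length : Int) < C := by
        rw [hs, hdec]
        exact mem_cacheOf_iff C hC w (recList v) (PySem.Str.lower city) hwc hcv
      have hlen : (PySem.Set.ofList v).length = (recList v).length :=
        length_eq_of_nodup_iff_mem _ _ (PySem.Set.nodup_ofList v) (recList_nodup v)
          (fun x => by rw [PySem.Set.mem_ofList, mem_recList])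
      rw [hslice, hlen, hmm]
    simp only [hiff]

theorem lastInv_step (seen : List String) (d : PySem.Dict String Int) (c : String)
    (h : LastInv seen d) : LastInv (seen ++ [c]) (d.insert c (seen.length : Int)) := by
  intro x
  by_cases hx : x = c
  · subst hx
    rw [PySem.Dict.get?_insert_self]
    refine ⟨by simp, fun j hj => ⟨seen, [], by simp, by simp at hj; omega, by simp⟩⟩
  · rw [PySem.Dict.get?_insert_of_ne _ _ hx]
    refine ⟨fun hn => ?_, fun j hj => ?_⟩
    · have := (h x).1 hn
      simp [hx, this]
    · obtain ⟨u, v, hs, hl, hv⟩ := (h x).2 j hj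
      exact ⟨u, v ++ [c], by simp [hs], hl, by simp [hv, hx]⟩

theorem main_loop (C : Int) (hC : 1 ≤ C) (rest : List String) :
    ∀ (ans : Int) (seen : List String) (d : PySem.Dict String Int), LastInv seen d →
    ((rest.foldl (fun acc city => acc.bind (fun st => solAStep C st city))
        (some (ans, cacheOf C (recList seen)))).map Prod.fst).getD 0
      = (rest.foldl (solBStep C) (ans, seen, d)).1 := by
  induction rest with
  | nil => intro ans seen d _; rfl
  | cons city rest ih =>
    intro ans seen d hinv
    rw [List.foldl_cons, List.foldl_cons, Option.bind_some,
        stepA_eq C hC ans (recList seen) (recList_nodup seen) city,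
        stepB_eq C hC ans seen d hinv city]
    rw [show recStep (recList seen) (PySem.Str.lower city)
          = recList (seen ++ [PySem.Str.lower city]) from (recList_append ..).symm]
    exact ih _ _ _ (lastInv_step seen d _ hinv)

-- ===== VERDICT (by name: the statement is the Claim_ definition above) =====
theorem solution_spec : Claim_equal_solution := by
  intro C cities _ hpre
  unfold Spec_solution solution solution_alt
  by_cases h0 : C = 0
  · simp [h0]
  · simp only [if_neg h0]
    rcases hpre with hge | hnil
    · have hC : 1 ≤ C := by omega
      have := main_loop C hC cities 0 [] PySem.Dict.empty
        (fun c => ⟨fun _ => by simp, fun j hj => by simp [PySem.Dict.get?_empty] at hj⟩)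
      simpa [recList, cacheOf] using this
    · subst hnil; rfl
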